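-- pv_equiv track=rewrite | github.com/tlhosep/joy-it-game | joy_it_game/tlu_hardware/tlu_hardwarebase.py | showdip
-- ===== SOURCE A (Python) =====
-- def showdip(diphex) -> str:
--     """
--     Show the DIP-setting in a human readable format
--     :param diphex: 8-bit code for the DIP-switch, 0=down, 1 = up
--     """
--     setting=0x80
--     result ="|"
--     for i in range(8):  # @UnusedVariable
--         if (setting & diphex != 0):
--             result += "°|"
--         else:
--             result += "_|"
--         setting = setting >> 1
--     return result
-- ===== SOURCE B (Python) =====
-- def showdip(diphex) -> str:
--     """
--     Show the DIP-setting in a human readable format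
--     :param diphex: 8-bit code for the DIP-switch, 0=down, 1 = up
--     """
--     bits = format(diphex & 0xFF, '08b')
--     return '|' + '|'.join('\u00b0' if c == '1' else '_' for c in bits) + '|'
-- ===== Notes on version B (the rewrite author's own statement) =====
-- stated objective: idiomatic
-- what changed: Replaced the stateful shifting-mask loop that appends cell-by-cell with a format-then-map pipeline: mask to 8 bits once, extract the binary digit string, map each digit to its glyph and join with '|' delimiters.
import Mathlib
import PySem

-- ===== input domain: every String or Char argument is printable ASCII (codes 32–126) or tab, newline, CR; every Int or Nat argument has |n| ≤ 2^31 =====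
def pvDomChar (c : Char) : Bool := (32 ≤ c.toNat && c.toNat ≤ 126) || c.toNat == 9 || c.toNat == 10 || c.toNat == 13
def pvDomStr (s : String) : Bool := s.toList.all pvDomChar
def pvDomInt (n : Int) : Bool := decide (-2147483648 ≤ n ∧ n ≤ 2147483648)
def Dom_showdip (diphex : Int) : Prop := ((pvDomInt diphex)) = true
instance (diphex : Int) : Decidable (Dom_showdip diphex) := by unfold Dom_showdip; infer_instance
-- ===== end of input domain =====

-- B replaces A's shifting-mask accumulator loop with a mask-once, format-then-map pipeline (objective: idiomatic; same cost).

-- ===== PORT A =====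
-- literal port of A: state = (setting, result chars); result appended inside the if, setting halved after
-- (Python's 'setting >> 1' on a nonnegative int is exactly floor division by 2: PySem.Int.floordiv setting 2)
def showdip (diphex : Int) : String :=
  let fin := (PySem.List.pyRange 0 8 1).foldl (fun (p : Int × List Char) _ =>
      (PySem.Int.floordiv p.1 2,
       if PySem.Int.band p.1 diphex ≠ 0 then p.2 ++ ['°','|'] else p.2 ++ ['_','|'])) (0x80, ['|'])
  String.ofList fin.2

-- ===== PORT B =====
-- literal port of Source B: mask to 8 bits once; format(m,'08b') is exact for 0 ≤ m < 256 as the digits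
-- testBit 7 .. testBit 0; then map digit→glyph and join with '|' delimiters
def showdip_alt (diphex : Int) : String :=
  let m : Nat := (PySem.Int.band diphex 255).toNat
  let bits : List Char := (List.range 8).map (fun i => if m.testBit (7 - i) then '1' else '0')
  String.ofList ('|' :: (List.intersperse '|' (bits.map (fun c => if c = '1' then '°' else '_'))) ++ ['|'])

-- ===== PRECONDITION & SPEC =====
def Spec_showdip (diphex : Int) (out : String) : Prop := out = showdip_alt diphex
instance (diphex : Int) (out : String) : Decidable (Spec_showdip diphex out) := by unfold Spec_showdip; infer_instance

-- ===== CLAIM (what is proved, stated in full; the proofs are below) =====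
def Claim_equal_showdip : Prop := ∀ (diphex : Int), Dom_showdip diphex → Spec_showdip diphex (showdip diphex)

-- ===== LEMMAS AND PROOFS =====

-- bit k of Python's d & 255 agrees with the test '2^k & d != 0', for nonnegative d
theorem bit_pos (d : Int) (k : Nat) (hk : k < 8) (h : 0 ≤ d) :
    (PySem.Int.band (2^k) d ≠ 0) ↔ (PySem.Int.band d 255).toNat.testBit k = true := by
  have h2 : (0:Int) ≤ 2^k := by positivity
  unfold PySem.Int.band
  rw [if_pos h2, if_pos h, if_pos h, if_pos (by norm_num : (0:Int) ≤ 255)]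
  simp only [Int.toNat_natCast]
  rw [Nat.testBit_and]
  have h255 : (255:Int).toNat = 2^8 - 1 := by decide
  rw [h255, Nat.testBit_two_pow_sub_one]
  have hpk : ((2:Int)^k).toNat = 2^k := by
    have : ((2:Int)^k) = ((2^k : Nat) : Int) := by push_cast; ring
    rw [this, Int.toNat_natCast]
  rw [hpk, Nat.and_comm, Nat.and_two_pow]
  rcases d.toNat.testBit k with _ | _ <;> simp [hk]

-- complementing below 2^8 flips each of the low 8 bits
set_option maxRecDepth 4096 in
theorem aux255 : ∀ a < 256, ∀ k < 8, (255 - a).testBit k = ! a.testBit k := by decide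

-- the same agreement for negative d (Python's infinite two's complement)
theorem bit_neg (d : Int) (k : Nat) (hk : k < 8) (h : d < 0) :
    (PySem.Int.band (2^k) d ≠ 0) ↔ (PySem.Int.band d 255).toNat.testBit k = true := by
  have h2 : (0:Int) ≤ 2^k := by positivity
  have hnd : ¬ (0:Int) ≤ d := by omega
  unfold PySem.Int.band
  rw [if_pos h2, if_neg hnd, if_neg hnd, if_pos (by norm_num : (0:Int) ≤ 255)]
  simp only [Int.toNat_natCast]
  set m := (-d - 1).toNat with hm
  have h255 : (255:Int).toNat = 2^8 - 1 := by decide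
  have hpk : ((2:Int)^k).toNat = 2^k := by
    have : ((2:Int)^k) = ((2^k : Nat) : Int) := by push_cast; ring
    rw [this, Int.toNat_natCast]
  rw [h255, hpk]
  have hand : (2^8 - 1) &&& m = m % 2^8 := by
    rw [Nat.and_comm]; exact Nat.and_two_pow_sub_one_eq_mod m 8
  rw [hand, Nat.and_comm, Nat.and_two_pow]
  have hmod : m % 2^8 < 256 := Nat.mod_lt _ (by norm_num)
  rw [show (2^8 - 1 : Nat) = 255 by norm_num, aux255 (m % 2^8) hmod k hk]
  rw [Nat.testBit_mod_two_pow]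
  rcases hb : m.testBit k with _ | _ <;> simp [hk]

theorem bit_eq (d : Int) (k : Nat) (hk : k < 8) :
    (PySem.Int.band (2^k) d ≠ 0) ↔ (PySem.Int.band d 255).toNat.testBit k = true := by
  by_cases h : d < 0
  · exact bit_neg d k hk h
  · exact bit_pos d k hk (by omega)

theorem bit_eq' (d : Int) (k : Nat) (hk : k < 8) :
    (PySem.Int.band (2^k) d = 0) ↔ (PySem.Int.band d 255).toNat.testBit k = false := by
  have := bit_eq d k hk
  constructor
  · intro h0; cases hb : (PySem.Int.band d 255).toNat.testBit k
    · rfl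
    · exact absurd h0 (this.mpr hb)
  · intro hb; by_contra h0; rw [this.mp h0] at hb; simp at hb

-- B's two-stage character choice collapses to a one-stage choice
theorem cellmap (b : Bool) :
    (if (if b = true then '1' else '0') = '1' then '°' else '_') = (if b = true then '°' else '_') := by
  cases b <;> decide

theorem band_bounds (d : Int) : 0 ≤ PySem.Int.band d 255 ∧ PySem.Int.band d 255 ≤ 255 := by
  unfold PySem.Int.band
  by_cases h : (0:Int) ≤ d
  · rw [if_pos h, if_pos (by norm_num : (0:Int) ≤ 255)]
    have := Nat.and_le_right (n := d.toNat) (m := (255:Int).toNat)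
    constructor
    · positivity
    · exact_mod_cast le_trans this (by decide)
  · rw [if_neg h, if_pos (by norm_num : (0:Int) ≤ 255)]
    constructor
    · positivity
    · have : (255:Int).toNat - ((255:Int).toNat &&& (-d - 1).toNat) ≤ 255 := by
        exact le_trans (Nat.sub_le _ _) (by decide)
      exact_mod_cast this

set_option maxRecDepth 20000 in
theorem showdip_eq_alt (d : Int) : showdip d = showdip_alt d := by
  have e7 := bit_eq' d 7 (by norm_num); norm_num at e7
  have e6 := bit_eq' d 6 (by norm_num); norm_num at e6
  have e5 := bit_eq' d 5 (by norm_num); norm_num at e5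
  have e4 := bit_eq' d 4 (by norm_num); norm_num at e4
  have e3 := bit_eq' d 3 (by norm_num); norm_num at e3
  have e2 := bit_eq' d 2 (by norm_num); norm_num at e2
  have e1 := bit_eq' d 1 (by norm_num); norm_num at e1
  have e0 := bit_eq' d 0 (by norm_num); norm_num at e0
  simp only [showdip, showdip_alt]
  norm_num [PySem.List.pyRange, List.range_succ, PySem.Int.floordiv, cellmap, List.intersperse,
    show Int.toNat 8 = 8 from rfl, List.map, List.foldl, Int.fdiv, e7, e6, e5, e4, e3, e2, e1, e0]
  obtain ⟨hlo, hhi⟩ := band_bounds d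
  have hm : (PySem.Int.band d 255).toNat < 256 := by omega
  generalize (PySem.Int.band d 255).toNat = m at hm ⊢
  revert m
  decide

-- ===== VERDICT (by name: the statement is the Claim_ definition above) =====
theorem showdip_spec : Claim_equal_showdip := by
  intro d _
  unfold Spec_showdip
  exact showdip_eq_alt d
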